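-- pv_equiv track=rewrite | github.com/clementetienam/physicsnemo | examples/reservoir_simulation/Norne/src/compare/batch/misc_gather.py | extract_tuples
-- ===== SOURCE A (Python) =====
-- def extract_tuples(set1, set2, set3, tuples_list):
--     # Extract tuples for set1
--     extracted_set1 = [tup for tup in tuples_list if tup[2] in set1]
--     extracted_set1.sort(key=lambda x: x[2])
--     extracted_set2 = [tup for tup in tuples_list if tup[2] in set2]
--     extracted_set2.sort(key=lambda x: x[2])
--     combined_set = list(set1) + list(set2)
--     extracted_set3 = [tup for tup in tuples_list if tup[2] in set3]
--     extracted_set3.sort(key=lambda x: x[2])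
--     final_remaining_list = [tup for tup in extracted_set3 if tup[2] not in combined_set]
--     final_remaining_list.sort(key=lambda x: x[2])
--     return extracted_set1, extracted_set2, final_remaining_list
-- ===== SOURCE B (Python) =====
-- def _insort(lst, tup):
--     # insert tup into key-sorted lst, after any equal keys (stable)
--     k = tup[2]
--     i = 0
--     while i < len(lst) and lst[i][2] <= k:
--         i += 1
--     lst.insert(i, tup)
--
--
-- def extract_tuples(set1, set2, set3, tuples_list):
--     # Single pass: classify each tuple once and place it directly at its
--     # sorted position in the relevant output list(s). No separate sort phase.
--     s1, s2, s3 = set(set1), set(set2), set(set3)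
--     out1, out2, rem = [], [], []
--     for tup in tuples_list:
--         k = tup[2]
--         if k in s1:
--             _insort(out1, tup)
--         if k in s2:
--             _insort(out2, tup)
--         if k in s3 and k not in s1 and k not in s2:
--             _insort(rem, tup)
--     return out1, out2, rem
-- ===== Notes on version B (the rewrite author's own statement) =====
-- stated objective: alternative
-- what changed: B makes a single pass over tuples_list, classifying each tuple once against hash sets and inserting it directly at its sorted position in the relevant output list, instead of A's staged filter-then-sort passes over four intermediate lists.
import Mathlib
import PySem

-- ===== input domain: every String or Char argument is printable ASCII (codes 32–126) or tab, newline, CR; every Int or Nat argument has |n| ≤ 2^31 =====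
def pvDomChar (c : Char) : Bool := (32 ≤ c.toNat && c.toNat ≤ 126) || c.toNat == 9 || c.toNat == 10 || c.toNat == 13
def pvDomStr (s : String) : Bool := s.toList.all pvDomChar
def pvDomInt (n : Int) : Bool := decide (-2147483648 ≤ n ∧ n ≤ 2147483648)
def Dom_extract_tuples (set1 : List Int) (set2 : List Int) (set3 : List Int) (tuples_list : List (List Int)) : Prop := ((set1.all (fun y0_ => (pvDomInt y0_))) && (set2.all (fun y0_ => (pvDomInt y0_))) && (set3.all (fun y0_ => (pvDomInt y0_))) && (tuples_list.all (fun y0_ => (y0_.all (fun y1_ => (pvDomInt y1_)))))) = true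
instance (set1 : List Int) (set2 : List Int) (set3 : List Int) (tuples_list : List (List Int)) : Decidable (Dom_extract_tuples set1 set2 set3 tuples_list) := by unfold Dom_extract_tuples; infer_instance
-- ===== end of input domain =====

-- B replaces A's staged filter-then-sort passes by a single pass that classifies each
-- tuple once and inserts it at its sorted position in the relevant output list
-- (objective: alternative decomposition; return value only — B builds its lists in place).

-- tup[2]: exact on Pre_ (every tuple has length ≥ 3; Python raises IndexError otherwise)
def pvKey (t : List Int) : Int := (PySem.List.pyGet? t 2).getD 0

-- ===== PORT A =====
def extract_tuples (set1 : List Int) (set2 : List Int) (set3 : List Int) (tuples_list : List (List Int)) : List (List Int) × List (List Int) × List (List Int) :=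
  let extracted_set1 := tuples_list.filter (fun tup => set1.contains (pvKey tup))
  let extracted_set1 := PySem.List.sorted extracted_set1 pvKey
  let extracted_set2 := tuples_list.filter (fun tup => set2.contains (pvKey tup))
  let extracted_set2 := PySem.List.sorted extracted_set2 pvKey
  let combined_set := set1 ++ set2
  let extracted_set3 := tuples_list.filter (fun tup => set3.contains (pvKey tup))
  let extracted_set3 := PySem.List.sorted extracted_set3 pvKey
  let final_remaining_list := extracted_set3.filter (fun tup => !combined_set.contains (pvKey tup))
  let final_remaining_list := PySem.List.sorted final_remaining_list pvKey
  (extracted_set1, extracted_set2, final_remaining_list)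

-- ===== PORT B =====
-- _insort's while loop: walk past every element whose key is ≤ k, insert there (stable)
def bInsort (lst : List (List Int)) (k : Int) (tup : List Int) : List (List Int) :=
  match lst with
  | [] => [tup]
  | y :: ys => if pvKey y ≤ k then y :: bInsort ys k tup else tup :: y :: ys

def extract_tuples_alt (set1 : List Int) (set2 : List Int) (set3 : List Int) (tuples_list : List (List Int)) : List (List Int) × List (List Int) × List (List Int) :=
  let s1 := PySem.Set.ofList set1
  let s2 := PySem.Set.ofList set2
  let s3 := PySem.Set.ofList set3
  tuples_list.foldl
    (fun acc tup =>
      let k := pvKey tup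
      let out1 := if s1.contains k then bInsort acc.1 k tup else acc.1
      let out2 := if s2.contains k then bInsort acc.2.1 k tup else acc.2.1
      let rem := if s3.contains k && !s1.contains k && !s2.contains k then bInsort acc.2.2 k tup else acc.2.2
      (out1, out2, rem))
    ([], [], [])

-- ===== PRECONDITION & SPEC =====
-- Pre_ excludes tuples shorter than 3 elements, on which Python A raises IndexError at tup[2].
def Pre_extract_tuples (set1 : List Int) (set2 : List Int) (set3 : List Int) (tuples_list : List (List Int)) : Prop :=
  ∀ t ∈ tuples_list, 3 ≤ t.length
instance (set1 : List Int) (set2 : List Int) (set3 : List Int) (tuples_list : List (List Int)) : Decidable (Pre_extract_tuples set1 set2 set3 tuples_list) := by unfold Pre_extract_tuples; infer_instance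

def pvWitness_extract_tuples : List Int × List Int × List Int × List (List Int) :=
  ([1], [2], [3, 1], [[0, 0, 3], [0, 0, 1], [0, 0, 2]])

def Spec_extract_tuples (set1 : List Int) (set2 : List Int) (set3 : List Int) (tuples_list : List (List Int)) (out : List (List Int) × List (List Int) × List (List Int)) : Prop := out = extract_tuples_alt set1 set2 set3 tuples_list
instance (set1 : List Int) (set2 : List Int) (set3 : List Int) (tuples_list : List (List Int)) (out : List (List Int) × List (List Int) × List (List Int)) : Decidable (Spec_extract_tuples set1 set2 set3 tuples_list out) := by unfold Spec_extract_tuples; infer_instance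

-- ===== CLAIM (what is proved, stated in full; the proofs are below) =====
def Claim_equal_extract_tuples : Prop := ∀ (set1 : List Int) (set2 : List Int) (set3 : List Int) (tuples_list : List (List Int)), Dom_extract_tuples set1 set2 set3 tuples_list → Pre_extract_tuples set1 set2 set3 tuples_list → Spec_extract_tuples set1 set2 set3 tuples_list (extract_tuples set1 set2 set3 tuples_list)

-- ===== LEMMAS AND PROOFS =====

-- B's hand-written stable insertion is exactly PySem's insertBy on the key order.
theorem bInsort_eq_insertBy (lst : List (List Int)) (tup : List Int) :
    bInsort lst (pvKey tup) tup
      = PySem.List.insertBy (fun a b => decide (pvKey a < pvKey b)) tup lst := by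
  induction lst with
  | nil => rfl
  | cons y ys ih =>
    by_cases h : pvKey y ≤ pvKey tup
    · have h' : ¬ pvKey tup < pvKey y := not_lt.mpr h
      simp [bInsort, PySem.List.insertBy, h, h', ih]
    · have h' : pvKey tup < pvKey y := not_le.mp h
      simp [bInsort, PySem.List.insertBy, h, h']

-- A conditional-insert fold equals the plain insertion-sort fold over the filtered list.
theorem cond_foldl_eq_filter_foldl (p : List Int → Bool) :
    ∀ (xs acc : List (List Int)),
    xs.foldl (fun acc x => if p x then bInsort acc (pvKey x) x else acc) acc
      = (xs.filter p).foldl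
          (fun acc x => PySem.List.insertBy (fun a b => decide (pvKey a < pvKey b)) x acc) acc := by
  intro xs
  induction xs with
  | nil => intro acc; rfl
  | cons x xs ih =>
    intro acc
    by_cases hp : p x
    · rw [List.foldl_cons, if_pos hp, bInsort_eq_insertBy, ih,
        List.filter_cons_of_pos hp, List.foldl_cons]
    · rw [List.foldl_cons, if_neg hp, ih, List.filter_cons_of_neg hp]

-- hence it is exactly PySem's stable sort of the filtered list
theorem cond_foldl_eq_sorted (p : List Int → Bool) (xs : List (List Int)) :
    xs.foldl (fun acc x => if p x then bInsort acc (pvKey x) x else acc) []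
      = PySem.List.sorted (xs.filter p) pvKey := by
  rw [PySem.List.sorted_eq_foldl_insertBy]
  exact cond_foldl_eq_filter_foldl p xs []

-- the fold over a triple of accumulators splits into three independent folds
theorem foldl_triple_split (f g h : List Int → Bool) :
    ∀ (xs : List (List Int)) (a b c : List (List Int)),
    xs.foldl
      (fun (acc : List (List Int) × List (List Int) × List (List Int)) (tup : List Int) =>
        (if f tup then bInsort acc.1 (pvKey tup) tup else acc.1,
         if g tup then bInsort acc.2.1 (pvKey tup) tup else acc.2.1,
         if h tup then bInsort acc.2.2 (pvKey tup) tup else acc.2.2)) (a, b, c)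
      = (xs.foldl (fun acc x => if f x then bInsort acc (pvKey x) x else acc) a,
         xs.foldl (fun acc x => if g x then bInsort acc (pvKey x) x else acc) b,
         xs.foldl (fun acc x => if h x then bInsort acc (pvKey x) x else acc) c) := by
  intro xs
  induction xs with
  | nil => intro a b c; rfl
  | cons x xs ih =>
    intro a b c
    simp only [List.foldl_cons]
    exact ih _ _ _

-- set(s) membership agrees with list membership
theorem ofList_contains (s : List Int) (k : Int) :
    (PySem.Set.ofList s).contains k = s.contains k := by
  by_cases h : k ∈ s <;> simp [PySem.Set.mem_ofList, h]

-- If x's key is strictly below every element's key, insertBy puts x in front.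
theorem insertBy_eq_cons_of_lt {α : Type} (key : α → Int) (x : α) (zs : List α)
    (h : ∀ z ∈ zs, key x < key z) :
    PySem.List.insertBy (fun a b => decide (key a < key b)) x zs = x :: zs := by
  cases zs with
  | nil => rfl
  | cons z zs =>
    simp [PySem.List.insertBy, h z (by simp)]

-- insertBy into a key-sorted list keeps it key-sorted.
theorem pairwise_insertBy {α : Type} (key : α → Int) (x : α) (ys : List α)
    (hs : ys.Pairwise (fun a b => key a ≤ key b)) :
    (PySem.List.insertBy (fun a b => decide (key a < key b)) x ys).Pairwise
      (fun a b => key a ≤ key b) := by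
  induction ys with
  | nil => simp [PySem.List.insertBy]
  | cons y ys ih =>
    rcases List.pairwise_cons.mp hs with ⟨hy, hs'⟩
    by_cases h : key x < key y
    · simp only [PySem.List.insertBy, h, decide_true, if_true]
      refine List.pairwise_cons.mpr ⟨?_, hs⟩
      intro z hz
      rcases List.mem_cons.mp hz with rfl | hz
      · exact le_of_lt h
      · exact le_of_lt (lt_of_lt_of_le h (hy z hz))
    · simp only [PySem.List.insertBy, h, decide_false]
      refine List.pairwise_cons.mpr ⟨?_, ih hs'⟩
      intro z hz
      rcases (PySem.List.mem_insertBy _ x z ys).mp hz with rfl | hz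
      · omega
      · exact hy z hz

-- filter commutes with a single stable insertion into a key-sorted list.
theorem filter_insertBy {α : Type} (p : α → Bool) (key : α → Int) (x : α) (ys : List α)
    (hs : ys.Pairwise (fun a b => key a ≤ key b)) :
    (PySem.List.insertBy (fun a b => decide (key a < key b)) x ys).filter p
      = if p x then PySem.List.insertBy (fun a b => decide (key a < key b)) x (ys.filter p)
        else ys.filter p := by
  induction ys with
  | nil => cases hpx : p x <;> simp [PySem.List.insertBy, List.filter, hpx]
  | cons y ys ih =>
    rcases List.pairwise_cons.mp hs with ⟨hy, hs'⟩
    by_cases h : key x < key y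
    · simp only [PySem.List.insertBy, h, decide_true, if_true]
      by_cases hpx : p x
      · rw [insertBy_eq_cons_of_lt key x ((y :: ys).filter p)
          (fun z hz => by
            rcases List.mem_cons.mp (List.mem_filter.mp hz).1 with rfl | hz'
            · exact h
            · exact lt_of_lt_of_le h (hy z hz'))]
        simp [List.filter, hpx]
      · simp [List.filter, hpx]
    · simp only [PySem.List.insertBy, h, decide_false]
      by_cases hpy : p y <;> by_cases hpx : p x <;>
        simp [List.filter, hpy, hpx, ih hs', PySem.List.insertBy, h]

-- filter commutes with the whole insertion-sort foldl (key-sorted accumulator).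
theorem filter_foldl_insertBy {α : Type} (p : α → Bool) (key : α → Int) :
    ∀ (xs acc : List α), acc.Pairwise (fun a b => key a ≤ key b) →
    (xs.foldl (fun acc x => PySem.List.insertBy (fun a b => decide (key a < key b)) x acc) acc).filter p
      = (xs.filter p).foldl (fun acc x => PySem.List.insertBy (fun a b => decide (key a < key b)) x acc) (acc.filter p) := by
  intro xs
  induction xs with
  | nil => intro acc _; simp
  | cons x xs ih =>
    intro acc hacc
    simp only [List.foldl_cons, List.filter]
    rw [ih _ (pairwise_insertBy key x acc hacc), filter_insertBy p key x acc hacc]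
    by_cases hpx : p x <;> simp [hpx]

-- Stable sort commutes with filter.
theorem filter_sorted {α : Type} (p : α → Bool) (key : α → Int) (xs : List α) :
    (PySem.List.sorted xs key).filter p = PySem.List.sorted (xs.filter p) key := by
  rw [PySem.List.sorted_eq_foldl_insertBy, PySem.List.sorted_eq_foldl_insertBy]
  simpa using filter_foldl_insertBy p key xs [] (by simp)

-- ===== VERDICT (by name: the statement is the Claim_ definition above) =====
theorem extract_tuples_spec : Claim_equal_extract_tuples := by
  intro set1 set2 set3 tuples_list _ _
  unfold Spec_extract_tuples extract_tuples extract_tuples_alt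
  simp only [foldl_triple_split, cond_foldl_eq_sorted]
  refine Prod.ext ?_ (Prod.ext ?_ ?_)
  · dsimp only
    exact congrArg (PySem.List.sorted · pvKey)
      (List.filter_congr (fun t _ => (ofList_contains set1 (pvKey t)).symm))
  · dsimp only
    exact congrArg (PySem.List.sorted · pvKey)
      (List.filter_congr (fun t _ => (ofList_contains set2 (pvKey t)).symm))
  · dsimp only
    rw [filter_sorted]
    rw [PySem.List.sorted_sorted]
    rw [List.filter_filter]
    apply congrArg (PySem.List.sorted · pvKey)
    apply List.filter_congr
    intro t _
    rw [ofList_contains, ofList_contains, ofList_contains]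
    simp only [List.contains_append]
    cases set1.contains (pvKey t) <;> cases set2.contains (pvKey t) <;>
      cases set3.contains (pvKey t) <;> rfl
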